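-- pv_equiv track=rewrite | github.com/cs204/Shisholm | extensions.py | tchk
-- ===== SOURCE A (Python) =====
-- def tchk(a):
--     b=""
--     a = a[::-1]
--     for i in range(0,len(a),):
--         if a[i]!='.':
--             b+=a[i]
--         else:
--             return(b[::-1])
--             break
--     return(b[::-1])
-- ===== SOURCE B (Python) =====
-- def tchk(a):
--     i = a.rfind('.')
--     return a[i+1:]
-- ===== Notes on version B (the rewrite author's own statement) =====
-- stated objective: idiomatic
-- what changed: Replaces A's reverse-the-string-then-accumulate-characters-until-a-dot loop with locating the last dot via rfind and returning one slice after it.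
import Mathlib
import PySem

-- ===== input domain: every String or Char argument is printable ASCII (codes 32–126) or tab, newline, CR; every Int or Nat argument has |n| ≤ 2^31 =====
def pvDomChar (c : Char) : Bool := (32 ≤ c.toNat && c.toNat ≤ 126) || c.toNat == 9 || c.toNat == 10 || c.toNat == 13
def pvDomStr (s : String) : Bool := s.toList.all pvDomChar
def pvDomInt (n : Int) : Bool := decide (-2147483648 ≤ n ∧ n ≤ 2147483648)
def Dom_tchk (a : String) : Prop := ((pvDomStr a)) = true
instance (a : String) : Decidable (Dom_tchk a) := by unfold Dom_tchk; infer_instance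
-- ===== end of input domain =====

-- B replaces A's reverse-and-accumulate character loop with rfind + one slice (idiomatic).

-- ===== PORT A =====
-- the for-loop over the reversed string: b += a[i] until a '.' is met, then return b[::-1]
def tchkGo : List Char → List Char → List Char
  | [], b => b.reverse
  | c :: rest, b => if c ≠ '.' then tchkGo rest (b ++ [c]) else b.reverse

def tchk (a : String) : String :=
  -- b = ""; a = a[::-1] (reversal of the code points); then the loop
  String.ofList (tchkGo a.toList.reverse [])

-- ===== PORT B =====
def tchk_alt (a : String) : String :=
  let i := PySem.Str.rfind a "."
  PySem.Str.slice a (some (i + 1)) none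

-- ===== PRECONDITION & SPEC =====
def Spec_tchk (a : String) (out : String) : Prop := out = tchk_alt a
instance (a : String) (out : String) : Decidable (Spec_tchk a out) := by unfold Spec_tchk; infer_instance

-- ===== CLAIM (what is proved, stated in full; the proofs are below) =====
def Claim_equal_tchk : Prop := ∀ (a : String), Dom_tchk a → Spec_tchk a (tchk a)

-- ===== LEMMAS AND PROOFS =====

lemma rfind_go_ge (s : List Char) (ch : Char) (j : Nat) :
    -1 ≤ PySem.Chars.rfind.go s [ch] j := by
  induction j with
  | zero => simp [PySem.Chars.rfind.go]; split_ifs <;> simp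
  | succ k ih =>
    rw [show PySem.Chars.rfind.go s [ch] (k+1) =
      if [ch].isPrefixOf (s.drop (k+1)) then ((k:Int)+1) else PySem.Chars.rfind.go s [ch] k from
      by simp [PySem.Chars.rfind.go]]
    split_ifs with h
    · omega
    · exact ih

lemma tchkGo_eq (l b : List Char) :
    tchkGo l b = (b ++ l.takeWhile (· ≠ '.')).reverse := by
  induction l generalizing b with
  | nil => simp [tchkGo]
  | cons c rest ih =>
    by_cases h : c = '.'
    · simp [tchkGo, h, List.takeWhile]
    · simp only [tchkGo, if_pos h, ih]
      rw [List.takeWhile_cons]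
      simp [h]

-- after scanning positions j, j-1, …, 0, dropping everything up to (and incl.)
-- the found dot leaves: the dot-free tail of take (j+1) s, followed by drop (j+1) s
lemma rfind_go_drop (s : List Char) (ch : Char) (j : Nat) :
    s.drop (PySem.Chars.rfind.go s [ch] j + 1).toNat =
      ((s.take (j+1)).reverse.takeWhile (· ≠ ch)).reverse ++ s.drop (j+1) := by
  induction j with
  | zero =>
    rw [show PySem.Chars.rfind.go s [ch] 0 = if [ch].isPrefixOf s then 0 else -1 from
      by simp [PySem.Chars.rfind.go]]
    cases s with
    | nil => simp
    | cons c t =>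
      by_cases h : ch = c
      · subst h
        simp [List.isPrefixOf]
      · have : [ch].isPrefixOf (c :: t) = false := by
          simp [List.isPrefixOf, h]
        simp [this, List.takeWhile, Ne.symm h]
  | succ k ih =>
    rw [show PySem.Chars.rfind.go s [ch] (k+1) =
      if [ch].isPrefixOf (s.drop (k+1)) then ((k:Int)+1) else PySem.Chars.rfind.go s [ch] k from
      by simp [PySem.Chars.rfind.go]]
    by_cases hlen : k + 1 < s.length
    · have hget : s[k+1]? = some s[k+1] := List.getElem?_eq_getElem hlen
      have hdrop : s.drop (k+1) = s[k+1] :: s.drop (k+2) := by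
        rw [List.drop_eq_getElem_cons hlen]
      have htake : s.take (k+2) = s.take (k+1) ++ [s[k+1]] := by
        rw [List.take_add_one, hget]; rfl
      by_cases h : s[k+1] = ch
      · have hpre : [ch].isPrefixOf (s.drop (k+1)) = true := by
          rw [hdrop, h]; simp [List.isPrefixOf]
        rw [hpre]
        simp only [if_true]
        rw [htake, h]
        have h2 : ((k:Int) + 1 + 1).toNat = k + 2 := by omega
        rw [h2]
        simp [List.takeWhile]
      · have hpre : [ch].isPrefixOf (s.drop (k+1)) = false := by
          rw [hdrop]; simp [List.isPrefixOf]; exact fun hc => absurd hc.symm h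
        rw [hpre]
        simp only [Bool.false_eq_true, if_false, ih, htake]
        rw [List.reverse_append]
        simp only [List.reverse_singleton, List.singleton_append]
        rw [List.takeWhile_cons, if_pos (show decide (s[k+1] ≠ ch) = true by simp [h])]
        simp only [List.reverse_cons]
        rw [List.append_assoc, hdrop]
        simp
    · have heq : s.take (k+2) = s.take (k+1) := by
        rw [List.take_of_length_le (by omega), List.take_of_length_le (by omega)]
      have hdrop2 : s.drop (k+2) = s.drop (k+1) := by
        rw [List.drop_of_length_le (by omega), List.drop_of_length_le (by omega)]
      have hpre : [ch].isPrefixOf (s.drop (k+1)) = false := by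
        rw [List.drop_of_length_le (by omega)]; simp [List.isPrefixOf]
      rw [hpre]
      simp only [Bool.false_eq_true, if_false, ih, heq, hdrop2]

lemma tchk_eq_alt (a : String) : tchk a = tchk_alt a := by
  unfold tchk tchk_alt
  set l := a.toList with hl
  have hr : PySem.Str.rfind a "." = PySem.Chars.rfind.go l ['.'] l.length := by
    rw [PySem.Str.rfind_eq]
    rfl
  have hge := rfind_go_ge l '.' l.length
  have hslice : (PySem.Str.slice a (some (PySem.Str.rfind a "." + 1)) none).toList =
      l.drop (PySem.Chars.rfind.go l ['.'] l.length + 1).toNat := by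
    rw [PySem.Str.toList_slice, PySem.Chars.slice_eq_listSlice,
      PySem.List.slice_from _ (by rw [hr]; omega), hr]
  have hmain : l.drop (PySem.Chars.rfind.go l ['.'] l.length + 1).toNat =
      (l.reverse.takeWhile (· ≠ '.')).reverse := by
    rw [rfind_go_drop l '.' l.length]
    rw [List.take_of_length_le (by omega), List.drop_of_length_le (by omega)]
    simp
  have : (PySem.Str.slice a (some (PySem.Str.rfind a "." + 1)) none).toList =
      tchkGo l.reverse [] := by
    rw [tchkGo_eq, hslice, hmain]
    simp
  calc String.ofList (tchkGo l.reverse []) 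
      = String.ofList (PySem.Str.slice a (some (PySem.Str.rfind a "." + 1)) none).toList := by rw [this]
    _ = _ := by rw [String.ofList_toList]

-- ===== VERDICT (by name: the statement is the Claim_ definition above) =====
theorem tchk_spec : Claim_equal_tchk := by
  intro a _
  unfold Spec_tchk
  exact tchk_eq_alt a
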